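-- pv_equiv track=rewrite | github.com/markhiner/Hiner.nyc | yocto/hotel_search_web.py | star_icons
-- ===== SOURCE A (Python) =====
-- from typing import Any, Dict, List, Tuple, Optional
--
-- def star_icons(class_int: int) -> str:
--     stars: List[str] = []
--     for i in range(5):
--         if i < class_int:
--             stars.append("""
-- <svg viewBox="0 0 24 24" class="star star-filled" aria-hidden="true">
--   <path d="M12 2l3.1 6.3 6.9 1-5 4.9 1.2 6.8L12 18l-6.2 3.3 1.2-6.8-5-4.9 6.9-1z"/>
-- </svg>
-- """)
--         else:
--             stars.append("""
-- <svg viewBox="0 0 24 24" class="star star-outline" aria-hidden="true">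
--   <path d="M12 3.8l2.3 4.7 5.2.8-3.8 3.7.9 5.2L12 16.9 7.4 18.2l.9-5.2L4.6 9.3l5.2-.8L12 3.8z" fill="none" stroke="currentColor" stroke-width="1.6"/>
-- </svg>
-- """)
--     return f"<div class='stars' title='{class_int}-star hotel'>{''.join(stars)}</div>"
-- ===== SOURCE B (Python) =====
-- _FILLED = """
-- <svg viewBox="0 0 24 24" class="star star-filled" aria-hidden="true">
--   <path d="M12 2l3.1 6.3 6.9 1-5 4.9 1.2 6.8L12 18l-6.2 3.3 1.2-6.8-5-4.9 6.9-1z"/>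
-- </svg>
-- """
-- _OUTLINE = """
-- <svg viewBox="0 0 24 24" class="star star-outline" aria-hidden="true">
--   <path d="M12 3.8l2.3 4.7 5.2.8-3.8 3.7.9 5.2L12 16.9 7.4 18.2l.9-5.2L4.6 9.3l5.2-.8L12 3.8z" fill="none" stroke="currentColor" stroke-width="1.6"/>
-- </svg>
-- """
--
-- # Constant strip: 5 filled icons followed by 5 outline icons.  Every possible
-- # rating body is a contiguous 5-element window of this strip: offset 0 gives
-- # five filled stars, offset 5 gives five outline stars.
-- _STRIP = [_FILLED] * 5 + [_OUTLINE] * 5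
--
-- def star_icons(class_int: int) -> str:
--     offset = min(max(5 - class_int, 0), 5)
--     body = ''.join(_STRIP[offset:offset + 5])
--     return f"<div class='stars' title='{class_int}-star hotel'>{body}</div>"
-- ===== Notes on version B (the rewrite author's own statement) =====
-- stated objective: alternative
-- what changed: Replaces A's 5-iteration loop with a per-element branch by a sliding window: a constant strip of 5 filled then 5 outline icons is built once, and the body is the contiguous 5-element slice at offset clamp(5 - class_int).
import Mathlib
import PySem

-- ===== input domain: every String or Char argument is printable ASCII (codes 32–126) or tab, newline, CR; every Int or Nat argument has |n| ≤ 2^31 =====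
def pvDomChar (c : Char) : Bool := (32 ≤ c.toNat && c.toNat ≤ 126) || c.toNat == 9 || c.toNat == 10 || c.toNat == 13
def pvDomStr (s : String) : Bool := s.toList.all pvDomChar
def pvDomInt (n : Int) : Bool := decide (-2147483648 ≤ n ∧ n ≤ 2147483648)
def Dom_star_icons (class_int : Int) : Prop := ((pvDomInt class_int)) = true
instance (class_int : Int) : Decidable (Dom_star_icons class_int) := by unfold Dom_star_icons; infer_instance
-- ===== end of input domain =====

-- B replaces A's 5-step loop with a per-element branch by a sliding window: a constant
-- strip of 5 filled then 5 outline icons, sliced at offset clamp(5 - class_int); same cost.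

-- ===== PORT A =====
def pvFilledSvgA : String := "\n<svg viewBox=\"0 0 24 24\" class=\"star star-filled\" aria-hidden=\"true\">\n  <path d=\"M12 2l3.1 6.3 6.9 1-5 4.9 1.2 6.8L12 18l-6.2 3.3 1.2-6.8-5-4.9 6.9-1z\"/>\n</svg>\n"
def pvOutlineSvgA : String := "\n<svg viewBox=\"0 0 24 24\" class=\"star star-outline\" aria-hidden=\"true\">\n  <path d=\"M12 3.8l2.3 4.7 5.2.8-3.8 3.7.9 5.2L12 16.9 7.4 18.2l.9-5.2L4.6 9.3l5.2-.8L12 3.8z\" fill=\"none\" stroke=\"currentColor\" stroke-width=\"1.6\"/>\n</svg>\n"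

def star_icons (class_int : Int) : String :=
  let stars : List String :=
    (PySem.List.pyRange 0 5 1).foldl
      (fun acc i => if i < class_int then acc ++ [pvFilledSvgA] else acc ++ [pvOutlineSvgA]) []
  "<div class='stars' title='" ++ PySem.Int.toStr class_int ++ "-star hotel'>" ++
    PySem.Str.join "" stars ++ "</div>"

-- ===== PORT B =====
def pvFilledSvgB : String := "\n<svg viewBox=\"0 0 24 24\" class=\"star star-filled\" aria-hidden=\"true\">\n  <path d=\"M12 2l3.1 6.3 6.9 1-5 4.9 1.2 6.8L12 18l-6.2 3.3 1.2-6.8-5-4.9 6.9-1z\"/>\n</svg>\n"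
def pvOutlineSvgB : String := "\n<svg viewBox=\"0 0 24 24\" class=\"star star-outline\" aria-hidden=\"true\">\n  <path d=\"M12 3.8l2.3 4.7 5.2.8-3.8 3.7.9 5.2L12 16.9 7.4 18.2l.9-5.2L4.6 9.3l5.2-.8L12 3.8z\" fill=\"none\" stroke=\"currentColor\" stroke-width=\"1.6\"/>\n</svg>\n"

-- _STRIP = [_FILLED] * 5 + [_OUTLINE] * 5
def pvStrip : List String :=
  PySem.List.pyRepeat [pvFilledSvgB] 5 ++ PySem.List.pyRepeat [pvOutlineSvgB] 5

def star_icons_alt (class_int : Int) : String :=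
  let offset : Int := min (max (5 - class_int) 0) 5
  let body : String :=
    PySem.Str.join "" (PySem.List.slice pvStrip (some offset) (some (offset + 5)))
  "<div class='stars' title='" ++ PySem.Int.toStr class_int ++ "-star hotel'>" ++
    body ++ "</div>"

-- ===== PRECONDITION & SPEC =====
def Spec_star_icons (class_int : Int) (out : String) : Prop := out = star_icons_alt class_int
instance (class_int : Int) (out : String) : Decidable (Spec_star_icons class_int out) := by unfold Spec_star_icons; infer_instance

-- ===== CLAIM (what is proved, stated in full; the proofs are below) =====
def Claim_equal_star_icons : Prop := ∀ (class_int : Int), Dom_star_icons class_int → Spec_star_icons class_int (star_icons class_int)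

-- ===== LEMMAS AND PROOFS =====

theorem pvSlice0 : PySem.List.slice pvStrip (some 0) (some 5) =
    [pvFilledSvgB, pvFilledSvgB, pvFilledSvgB, pvFilledSvgB, pvFilledSvgB] := rfl
theorem pvSlice1 : PySem.List.slice pvStrip (some 1) (some 6) =
    [pvFilledSvgB, pvFilledSvgB, pvFilledSvgB, pvFilledSvgB, pvOutlineSvgB] := rfl
theorem pvSlice2 : PySem.List.slice pvStrip (some 2) (some 7) =
    [pvFilledSvgB, pvFilledSvgB, pvFilledSvgB, pvOutlineSvgB, pvOutlineSvgB] := rfl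
theorem pvSlice3 : PySem.List.slice pvStrip (some 3) (some 8) =
    [pvFilledSvgB, pvFilledSvgB, pvOutlineSvgB, pvOutlineSvgB, pvOutlineSvgB] := rfl
theorem pvSlice4 : PySem.List.slice pvStrip (some 4) (some 9) =
    [pvFilledSvgB, pvOutlineSvgB, pvOutlineSvgB, pvOutlineSvgB, pvOutlineSvgB] := rfl
theorem pvSlice5 : PySem.List.slice pvStrip (some 5) (some 10) =
    [pvOutlineSvgB, pvOutlineSvgB, pvOutlineSvgB, pvOutlineSvgB, pvOutlineSvgB] := rfl

theorem star_icons_eq_alt (c : Int) : star_icons c = star_icons_alt c := by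
  have hr : PySem.List.pyRange 0 5 1 = [0, 1, 2, 3, 4] := by decide
  have hf : pvFilledSvgB = pvFilledSvgA := rfl
  have ho : pvOutlineSvgB = pvOutlineSvgA := rfl
  apply String.toList_injective
  by_cases h0 : c ≤ 0
  · have hn : min (max (5 - c) 0) 5 = 5 := by omega
    simp only [star_icons, star_icons_alt, hr, hn, ho, List.foldl,
      if_neg (by omega : ¬ (0:Int) < c), if_neg (by omega : ¬ (1:Int) < c),
      if_neg (by omega : ¬ (2:Int) < c), if_neg (by omega : ¬ (3:Int) < c),
      if_neg (by omega : ¬ (4:Int) < c),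
      show (5:Int) + 5 = 10 from by norm_num, pvSlice5,
      List.nil_append, List.cons_append]
  · by_cases h5 : 5 ≤ c
    · have hn : min (max (5 - c) 0) 5 = 0 := by omega
      simp only [star_icons, star_icons_alt, hr, hn, hf, List.foldl,
        if_pos (by omega : (0:Int) < c), if_pos (by omega : (1:Int) < c),
        if_pos (by omega : (2:Int) < c), if_pos (by omega : (3:Int) < c),
        if_pos (by omega : (4:Int) < c),
        show (0:Int) + 5 = 5 from by norm_num, pvSlice0,
        List.nil_append, List.cons_append]
    · interval_cases c
      · norm_num only [star_icons, star_icons_alt, hr, hf, ho, List.foldl,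
          List.nil_append, List.cons_append]
        simp [pvSlice4, hf, ho, PySem.Str.toList_join,
          PySem.Chars.join_cons_cons, PySem.Chars.join_singleton]
      · norm_num only [star_icons, star_icons_alt, hr, hf, ho, List.foldl,
          List.nil_append, List.cons_append]
        simp [pvSlice3, hf, ho, PySem.Str.toList_join,
          PySem.Chars.join_cons_cons, PySem.Chars.join_singleton]
      · norm_num only [star_icons, star_icons_alt, hr, hf, ho, List.foldl,
          List.nil_append, List.cons_append]
        simp [pvSlice2, hf, ho, PySem.Str.toList_join,
          PySem.Chars.join_cons_cons, PySem.Chars.join_singleton]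
      · norm_num only [star_icons, star_icons_alt, hr, hf, ho, List.foldl,
          List.nil_append, List.cons_append]
        simp [pvSlice1, hf, ho, PySem.Str.toList_join,
          PySem.Chars.join_cons_cons, PySem.Chars.join_singleton]

-- ===== VERDICT (by name: the statement is the Claim_ definition above) =====
theorem star_icons_spec : Claim_equal_star_icons := by
  intro c _
  exact star_icons_eq_alt c
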